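-- pv_equiv track=rewrite | github.com/JohnDorsey/RelentlessFractals | PureGenTools.py | gen_track_recent_full
-- ===== SOURCE A (Python) =====
-- import collections
--
-- class MysteriousError(Exception):
--     # don't catch this. Just identify its cause and replace it with a better exception. and then maybe catch it.
--     pass
--
-- def gen_track_recent(input_seq, count=None, default=None):
--     history = collections.deque([default for i in range(count)])
--     for item in input_seq:
--         history.append(item)
--         history.popleft()
--         yield tuple(history)
--
-- def gen_track_recent_full(input_seq, count=None, allow_waste=False):
--     assert count >= 2
--     result = gen_track_recent(input_seq, count=count)
--     """
--     i, Waste = (None, None)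
--     for i in range(count-1,0,-1):
--         try:
--             waste = next(result)
--             assert waste.count(None) == i
--         except StopIteration:
--             raise IndexError("could not!?")
--     assert i == 1
--     """
--     trash = tuple(None for i in range(count))
--     while trash.count(None) > 1:
--         try:
--             trash = next(result)
--         except StopIteration:
--             if allow_waste:
--                 return ()
--             else:
--                 raise MysteriousError(f"not enough items to yield a full batch of {count} items.")
--     assert trash.count(None) == 1
--     assert trash[0] is None
--     return result
-- ===== SOURCE B (Python) =====
-- def gen_track_recent_full(input_seq, count=None, allow_waste=False):
--     assert count >= 2
--     seq = list(input_seq)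
--     if len(seq) < count - 1:
--         if allow_waste:
--             return ()
--         raise ValueError(f"not enough items to yield a full batch of {count} items.")
--     return (tuple(seq[i:i + count]) for i in range(len(seq) - count + 1))
-- ===== Notes on version B (the rewrite author's own statement) =====
-- stated objective: faster
-- what changed: Replaces the deque-of-Nones generator plus the warm-up loop that repeatedly builds a length-count tuple and counts its Nones with a direct generator of slices seq[i:i+count] over the full-window index range, so no padding, no None-counting and no warm-up consumption happen at all.
import Mathlib
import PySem

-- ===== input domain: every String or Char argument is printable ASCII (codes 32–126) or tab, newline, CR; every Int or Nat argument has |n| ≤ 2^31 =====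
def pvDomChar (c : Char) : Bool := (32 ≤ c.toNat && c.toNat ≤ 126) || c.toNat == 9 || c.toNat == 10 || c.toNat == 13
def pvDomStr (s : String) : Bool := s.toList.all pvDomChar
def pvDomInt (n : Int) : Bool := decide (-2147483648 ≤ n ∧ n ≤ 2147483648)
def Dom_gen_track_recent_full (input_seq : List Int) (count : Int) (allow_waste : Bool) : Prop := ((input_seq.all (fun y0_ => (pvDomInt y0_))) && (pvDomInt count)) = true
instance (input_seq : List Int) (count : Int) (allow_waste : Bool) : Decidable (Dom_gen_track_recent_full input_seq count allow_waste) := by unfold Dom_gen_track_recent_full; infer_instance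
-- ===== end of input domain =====

-- B replaces A's None-padded deque generator and its warm-up loop (which rebuilds and
-- None-counts a length-count tuple each step) by directly slicing the full windows;
-- equivalence is about the RETURN value (materialised list of yields of the returned generator).

-- ===== PORT A =====
-- gen_track_recent: deque of `count` Nones; per item append right, pop left, yield a copy.
-- Modelled as the list of all yields; the deque is a List (Option Int).
def pvGenTrackRecent : List (Option Int) → List Int → List (List (Option Int))
  | _, [] => []
  | history, item :: rest =>
    ((history ++ [some item]).drop 1)          -- history.append(item); history.popleft()
      :: pvGenTrackRecent ((history ++ [some item]).drop 1) rest   -- yield tuple(history)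

-- the `while trash.count(None) > 1: trash = next(result)` loop; the unconsumed yields
-- are the returned generator.  On StopIteration A returns () if allow_waste else raises
-- MysteriousError (excluded by Pre_); both are [] here.
def pvWarmLoop : List (Option Int) → List (List (Option Int)) → Bool → List (List (Option Int))
  | trash, [], _ => if List.count (none : Option Int) trash > 1 then [] else []       -- StopIteration / exhausted generator
  | trash, t :: rest, allow_waste =>
    if List.count (none : Option Int) trash > 1 then pvWarmLoop t rest allow_waste
    else t :: rest

def gen_track_recent_full (input_seq : List Int) (count : Int) (allow_waste : Bool) : List (List Int) :=
  -- result = gen_track_recent(input_seq, count); warm-up loop; the remaining yields contain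
  -- no None (asserted invariant), so the typed boundary Option Int → Int is filterMap id
  (pvWarmLoop (List.replicate count.toNat none)
      (pvGenTrackRecent (List.replicate count.toNat none) input_seq) allow_waste).map
    (List.filterMap id)

-- ===== PORT B =====
def gen_track_recent_full_alt (input_seq : List Int) (count : Int) (allow_waste : Bool) : List (List Int) :=
  if (input_seq.length : Int) < count - 1 then []   -- B: () if allow_waste else raise (raise excluded by Pre_)
  else (List.range (input_seq.length + 1 - count.toNat)).map
        (fun i => (input_seq.drop i).take count.toNat)

-- ===== PRECONDITION & SPEC =====
-- Pre_ excludes exactly the inputs on which A raises: count < 2 (assert) and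
-- input shorter than count-1 with allow_waste=False (MysteriousError).
def Pre_gen_track_recent_full (input_seq : List Int) (count : Int) (allow_waste : Bool) : Prop :=
  2 ≤ count ∧ (allow_waste = true ∨ count - 1 ≤ (input_seq.length : Int))
instance (input_seq : List Int) (count : Int) (allow_waste : Bool) : Decidable (Pre_gen_track_recent_full input_seq count allow_waste) := by unfold Pre_gen_track_recent_full; infer_instance

def pvWitness_gen_track_recent_full : List Int × Int × Bool := ([1, 2, 3], 2, false)

def Spec_gen_track_recent_full (input_seq : List Int) (count : Int) (allow_waste : Bool) (out : List (List Int)) : Prop := out = gen_track_recent_full_alt input_seq count allow_waste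
instance (input_seq : List Int) (count : Int) (allow_waste : Bool) (out : List (List Int)) : Decidable (Spec_gen_track_recent_full input_seq count allow_waste out) := by unfold Spec_gen_track_recent_full; infer_instance

-- ===== CLAIM (what is proved, stated in full; the proofs are below) =====
def Claim_equal_gen_track_recent_full : Prop := ∀ (input_seq : List Int) (count : Int) (allow_waste : Bool), Dom_gen_track_recent_full input_seq count allow_waste → Pre_gen_track_recent_full input_seq count allow_waste → Spec_gen_track_recent_full input_seq count allow_waste (gen_track_recent_full input_seq count allow_waste)

-- ===== LEMMAS AND PROOFS =====

theorem pv_count_none_map_some (ys : List Int) :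
    List.count (none : Option Int) (ys.map some) = 0 := by
  induction ys with
  | nil => simp
  | cons y ys ih => simp [ih]

theorem pv_count_none_pad (k : ℕ) (ys : List Int) :
    List.count (none : Option Int) (List.replicate k none ++ ys.map some) = k := by
  simp [List.count_append, pv_count_none_map_some]

theorem pv_take_len_append {α : Type} (l₁ l₂ : List α) (n : ℕ) :
    (l₁ ++ l₂).take (l₁.length + n) = l₁ ++ l₂.take n := by
  induction l₁ with
  | nil => simp
  | cons a l ih => simpa [List.length_cons, Nat.succ_add] using by simp [ih]

-- warm-up phase: starting with k = m+2 Nones, the loop consumes min(m+1, |xs|) yields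
theorem pv_warm_phase (m : ℕ) : ∀ (ys xs : List Int) (aw : Bool),
    pvWarmLoop (List.replicate (m + 2) none ++ ys.map some)
      (pvGenTrackRecent (List.replicate (m + 2) none ++ ys.map some) xs) aw
    = if m + 1 ≤ xs.length then
        pvGenTrackRecent (List.replicate 1 none ++ ((ys ++ xs.take (m + 1)).map some)) (xs.drop (m + 1))
      else [] := by
  induction m with
  | zero =>
    intro ys xs aw
    cases xs with
    | nil => simp [pvGenTrackRecent, pvWarmLoop]
    | cons x xs' =>
      have h1 : ((List.replicate 2 (none : Option Int) ++ ys.map some) ++ [some x]).drop 1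
          = List.replicate 1 none ++ ((ys ++ [x]).map some) := by
        simp [List.replicate_succ]
      simp only [pvGenTrackRecent, pvWarmLoop, h1, pv_count_none_pad]
      rw [if_pos (by norm_num)]
      have ht : (x :: xs').take 1 = [x] := rfl
      have hd : (x :: xs').drop 1 = xs' := rfl
      rw [if_pos (by simp), ht, hd]
      cases xs' with
      | nil => simp [pvGenTrackRecent, pvWarmLoop]
      | cons y ys' => simp only [pvGenTrackRecent, pvWarmLoop, pv_count_none_pad]; norm_num
  | succ m ih =>
    intro ys xs aw
    cases xs with
    | nil =>
      simp only [pvGenTrackRecent, pvWarmLoop, pv_count_none_pad]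
      rw [if_pos (by omega)]
      simp
    | cons x xs' =>
      have h1 : ((List.replicate (m + 3) (none : Option Int) ++ ys.map some) ++ [some x]).drop 1
          = List.replicate (m + 2) none ++ ((ys ++ [x]).map some) := by
        simp [List.replicate_succ]
      simp only [pvGenTrackRecent, pvWarmLoop, h1, pv_count_none_pad]
      rw [if_pos (by omega), ih (ys ++ [x]) xs' aw]
      have ht : (x :: xs').take (m + 2) = x :: xs'.take (m + 1) := rfl
      have hd : (x :: xs').drop (m + 2) = xs'.drop (m + 1) := rfl
      by_cases h : m + 1 ≤ xs'.length
      · rw [if_pos h, if_pos (by simp; omega), ht, hd]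
        simp [List.append_assoc]
      · rw [if_neg h, if_neg (by simp; omega)]

-- all-some phase: once the window holds only real items it slides over zs ++ xs
theorem pv_gen_some : ∀ (xs zs : List Int), zs ≠ [] →
    (pvGenTrackRecent (zs.map some) xs).map (List.filterMap id)
    = (List.range xs.length).map (fun i => ((zs ++ xs).drop (i + 1)).take zs.length) := by
  intro xs
  induction xs with
  | nil => intro zs _; simp [pvGenTrackRecent]
  | cons x xs ih =>
    intro zs hzs
    cases zs with
    | nil => exact absurd rfl hzs
    | cons z zs' =>
      have hstep : ((some z :: List.map some zs') ++ [some x]).drop 1 = ((zs' ++ [x]).map some) := by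
        simp
      have hne : zs' ++ [x] ≠ [] := by simp
      simp only [pvGenTrackRecent, List.map_cons]
      rw [hstep, ih (zs' ++ [x]) hne]
      simp only [List.length_cons]
      rw [List.range_succ_eq_map, List.map_cons, List.map_map]
      congr 1
      · -- head: the first full window
        have h0 : ((z :: zs' ++ x :: xs).drop (0 + 1)).take (zs'.length + 1)
            = zs' ++ [x] := by
          simpa using pv_take_len_append zs' (x :: xs) 1
        rw [h0]
        simp [List.filterMap_map]
      · -- tail: remaining windows, shifted by one
        apply List.map_congr_left
        intro i _
        have hlen : (zs' ++ [x]).length = (z :: zs').length := by simp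
        have hcat : (zs' ++ [x]) ++ xs = (z :: zs' ++ x :: xs).drop 1 := by simp
        simp only [Function.comp, hlen, hcat, List.drop_drop]
        congr 2
        omega

-- ===== VERDICT (by name: the statement is the Claim_ definition above) =====
theorem gen_track_recent_full_spec : Claim_equal_gen_track_recent_full := by
  intro seq count aw _ hpre
  obtain ⟨hc, _⟩ := hpre
  unfold Spec_gen_track_recent_full gen_track_recent_full gen_track_recent_full_alt
  set n := seq.length with hn
  have hcnt : (count.toNat : Int) = count := Int.toNat_of_nonneg (by omega)
  obtain ⟨m, hm⟩ : ∃ m, count.toNat = m + 2 := ⟨count.toNat - 2, by omega⟩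
  have hcm : count = (m : Int) + 2 := by rw [← hcnt, hm]; push_cast; ring
  have hwarm := pv_warm_phase m [] seq aw
  simp only [List.map_nil, List.append_nil, List.nil_append] at hwarm
  rw [hm, hwarm]
  by_cases hlen : m + 1 ≤ n
  · rw [if_pos hlen, if_neg (by rw [hcm]; omega)]
    cases hdrop : seq.drop (m + 1) with
    | nil =>
      have hne : n = m + 1 := by
        have := List.drop_eq_nil_iff.mp hdrop
        omega
      rw [show n + 1 - (m + 2) = 0 by omega]
      simp [pvGenTrackRecent]
    | cons x rest =>
      have hge : m + 2 ≤ n := by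
        have := congrArg List.length hdrop
        simp at this
        omega
      have hx : seq.take (m + 2) = seq.take (m + 1) ++ [x] := by
        conv_lhs => rw [← List.take_append_drop (m + 1) seq, hdrop]
        have hl : (seq.take (m + 1)).length = m + 1 := by simp; omega
        rw [show m + 2 = (seq.take (m + 1)).length + 1 by omega, pv_take_len_append]
        rfl
      have hstep : ((List.replicate 1 (none : Option Int) ++ (seq.take (m + 1)).map some) ++ [some x]).drop 1
          = (seq.take (m + 2)).map some := by
        simp [hx]
      simp only [pvGenTrackRecent, hstep, List.map_cons]
      have htlen : (seq.take (m + 2)).length = m + 2 := by simp; omega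
      have hne : seq.take (m + 2) ≠ [] := by
        intro h
        rw [h] at htlen
        simp at htlen
      rw [pv_gen_some rest (seq.take (m + 2)) hne]
      have hrest : seq.drop (m + 2) = rest := by
        rw [show m + 2 = (m + 1) + 1 by omega, ← List.drop_drop, hdrop]
        rfl
      have hcat : seq.take (m + 2) ++ rest = seq := by
        rw [← hrest]; exact List.take_append_drop _ _
      have hrl : rest.length = n - (m + 2) := by
        have h2 := congrArg List.length hcat
        rw [List.length_append, htlen] at h2
        omega
      rw [hcat, htlen, hrl, show n + 1 - (m + 2) = (n - (m + 2)) + 1 by omega,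
          List.range_succ_eq_map, List.map_cons, List.map_map]
      simp [List.filterMap_map, Function.comp]
  · rw [if_neg hlen, if_pos (by rw [hcm]; omega)]
    simp
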